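-- pv_equiv track=rewrite | github.com/Creeper0809/baekjoon | 수학/GCD!.py | gcd_factorial
-- ===== SOURCE A (Python) =====
-- def factorize(k):
--     factors = {}
--     # 2로 나누기
--     while k % 2 == 0:
--         factors[2] = factors.get(2, 0) + 1
--         k //= 2
--     # 3,5,7,... 으로 나누기
--     p = 3
--     while p * p <= k:
--         while k % p == 0:
--             factors[p] = factors.get(p, 0) + 1
--             k //= p
--         p += 2
--     # 남은 소수
--     if k > 1:
--         factors[k] = factors.get(k, 0) + 1
--     return factors
--
-- def exp_in_factorial(n, p):
--     cnt = 0
--     while n: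
--         n //= p
--         cnt += n
--     return cnt
--
-- def gcd_factorial(n, k):
--     k_facs = factorize(k)
--     g = 1
--     for p, a in k_facs.items():
--         e = exp_in_factorial(n, p)
--         if e > 0:
--             g *= p ** min(a, e)
--     return g
-- ===== SOURCE B (Python) =====
-- def _gcd(a, b):
--     while b:
--         a, b = b, a % b
--     return a
--
-- def gcd_factorial(n, k):
--     # No factorization: for i = 2..n extract gcd(i, r) from the residual r.
--     # Per prime p, the steps collect sum_i min-portions totalling
--     # min(v_p(n!), v_p(k)), so the product is exactly gcd(n!, k).
--     result = 1
--     r = k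
--     for i in range(2, n + 1):
--         if r == 1:
--             break
--         g = _gcd(i, r)
--         result *= g
--         r //= g
--     return result
-- ===== Notes on version B (the rewrite author's own statement) =====
-- stated objective: alternative
-- what changed: B does no factorization at all: instead of A's trial-division of k into a prime-exponent dict plus a Legendre division loop per prime, B runs one pass i = 2..n keeping only a residual r (initially k) and a running product, each step multiplying in gcd(i, r) and dividing r by it (stopping early at r = 1); the products of these gcds telescope to gcd(n!, k) because the i-sum of v_p(i) is v_p(n!).
-- outside the precondition, e.g. on gcd_factorial(3, -6): A returns 2, B returns -6; on gcd_factorial(5, -1): A returns 1, B returns -1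
import Mathlib
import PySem

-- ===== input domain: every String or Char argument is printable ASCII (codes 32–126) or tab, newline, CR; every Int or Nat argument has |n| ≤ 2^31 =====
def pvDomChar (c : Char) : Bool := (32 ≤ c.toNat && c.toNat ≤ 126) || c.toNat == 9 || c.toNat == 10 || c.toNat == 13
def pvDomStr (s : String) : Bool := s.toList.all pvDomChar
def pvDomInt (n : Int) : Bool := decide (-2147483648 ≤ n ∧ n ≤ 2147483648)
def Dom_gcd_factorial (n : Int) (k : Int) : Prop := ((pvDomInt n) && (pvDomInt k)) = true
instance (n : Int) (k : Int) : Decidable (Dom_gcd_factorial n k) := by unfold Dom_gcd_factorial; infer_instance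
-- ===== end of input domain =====

-- B does no factorization at all: one pass i = 2..n multiplies in gcd(i, residual) and divides
-- the residual by it, replacing A's trial-division dict + per-prime Legendre loops (objective:
-- alternative; not measured faster).

-- ===== PORT A =====
-- while k % 2 == 0 (fuel makes the loop total; unreached under Pre_)
def pvFac2 : Nat → Int → PySem.Dict Int Int → Int × PySem.Dict Int Int
  | 0, k, d => (k, d)
  | fuel+1, k, d =>
    if PySem.Int.mod k 2 = 0 then
      pvFac2 fuel (PySem.Int.floordiv k 2) (d.insert 2 (d.getD 2 0 + 1))
    else (k, d)

-- inner: while k % p == 0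
def pvFacP : Nat → Int → Int → PySem.Dict Int Int → Int × PySem.Dict Int Int
  | 0, k, _, d => (k, d)
  | fuel+1, k, p, d =>
    if PySem.Int.mod k p = 0 then
      pvFacP fuel (PySem.Int.floordiv k p) p (d.insert p (d.getD p 0 + 1))
    else (k, d)

-- outer: while p * p <= k, p += 2
def pvFacOdd : Nat → Int → Int → PySem.Dict Int Int → Int × PySem.Dict Int Int
  | 0, k, _, d => (k, d)
  | fuel+1, k, p, d =>
    if p * p ≤ k then
      let kd := pvFacP (k.natAbs + 1) k p d
      pvFacOdd fuel kd.1 (p + 2) kd.2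
    else (k, d)

def pvFactorize (k : Int) : PySem.Dict Int Int :=
  let kd1 := pvFac2 (k.natAbs + 1) k PySem.Dict.empty
  let kd2 := pvFacOdd (kd1.1.natAbs + 1) kd1.1 3 kd1.2
  if kd2.1 > 1 then kd2.2.insert kd2.1 (kd2.2.getD kd2.1 0 + 1) else kd2.2

-- while n: n //= p; cnt += n
def pvExpInFact : Nat → Int → Int → Int → Int
  | 0, _, _, cnt => cnt
  | fuel+1, n, p, cnt =>
    if n ≠ 0 then
      pvExpInFact fuel (PySem.Int.floordiv n p) p (cnt + PySem.Int.floordiv n p)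
    else cnt

def gcd_factorial (n : Int) (k : Int) : Int :=
  let kfacs := pvFactorize k
  kfacs.items.foldl (fun g pa =>
    let e := pvExpInFact (n.natAbs + 1) n pa.1 0
    if e > 0 then g * pa.1 ^ (min pa.2 e).toNat else g) 1

-- ===== PORT B =====
-- _gcd(a, b): while b: a, b = b, a % b  (fuel makes it total; b strictly shrinks)
def pvGcdLoop : Nat → Int → Int → Int
  | 0, a, _ => a
  | fuel+1, a, b => if b ≠ 0 then pvGcdLoop fuel b (PySem.Int.mod a b) else a

-- for i in range(2, n+1): break if r == 1; g = _gcd(i, r); result *= g; r //= g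
-- (fuel = exact length of range(2, n+1))
def pvAltLoop : Nat → Int → Int → Int → Int × Int
  | 0, _, result, r => (result, r)
  | fuel+1, i, result, r =>
    if r = 1 then (result, r)
    else
      let g := pvGcdLoop (r.natAbs + 1) i r
      pvAltLoop fuel (i + 1) (result * g) (PySem.Int.floordiv r g)

def gcd_factorial_alt (n : Int) (k : Int) : Int :=
  (pvAltLoop (n - 1).toNat 2 1 k).1

-- ===== PRECONDITION & SPEC =====
-- Pre_ restricts to the problem's natural domain n ≥ 0, k ≥ 1: A never returns on k = 0 or on
-- n < 0 with |k| ≥ 2 (its while-loops do not terminate), and for k < 0 its trial division keeps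
-- only the 2-part of k, an accident of the implementation no caller would specify.
def Pre_gcd_factorial (n : Int) (k : Int) : Prop := 0 ≤ n ∧ 1 ≤ k
instance (n : Int) (k : Int) : Decidable (Pre_gcd_factorial n k) := by unfold Pre_gcd_factorial; infer_instance
def pvWitness_gcd_factorial : Int × Int := (6, 20)

def Spec_gcd_factorial (n : Int) (k : Int) (out : Int) : Prop := out = gcd_factorial_alt n k
instance (n : Int) (k : Int) (out : Int) : Decidable (Spec_gcd_factorial n k out) := by unfold Spec_gcd_factorial; infer_instance

-- ===== CLAIM (what is proved, stated in full; the proofs are below) =====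
def Claim_equal_gcd_factorial : Prop := ∀ (n : Int) (k : Int), Dom_gcd_factorial n k → Pre_gcd_factorial n k → Spec_gcd_factorial n k (gcd_factorial n k)

-- ===== LEMMAS AND PROOFS =====

-- cast a Nat pair list to Int pairs (dict items)
def pvCast (L : List (Nat × Nat)) : List (Int × Int) := L.map (fun pa => ((pa.1 : Int), (pa.2 : Int)))

-- multiplicity: number of times p divides m
def pvMult (p m : Nat) : Nat :=
  if h : 2 ≤ p ∧ 0 < m ∧ p ∣ m then pvMult p (m / p) + 1 else 0
termination_by m
decreasing_by exact Nat.div_lt_self h.2.1 h.1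

-- Legendre loop: n//p + (n//p)//p + ...
def pvL (m p : Nat) : Nat :=
  if h : 0 < m ∧ 2 ≤ p then m / p + pvL (m / p) p else 0
termination_by m
decreasing_by exact Nat.div_lt_self h.1 h.2

-- spec of the odd trial-division loop: (final residual, pairs (prime, multiplicity) appended)
def pvOdd (m p : Nat) : Nat × List (Nat × Nat) :=
  if h : 2 ≤ p ∧ p * p ≤ m then
    let v := pvMult p m
    let rest := pvOdd (m / p ^ v) (p + 2)
    (rest.1, if v = 0 then rest.2 else (p, v) :: rest.2)
  else (m, [])
termination_by m.sqrt + 2 - p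
decreasing_by
  have h1 : (m / p ^ pvMult p m).sqrt ≤ m.sqrt := Nat.sqrt_le_sqrt (Nat.div_le_self _ _)
  have h2 : p ≤ m.sqrt := Nat.le_sqrt'.mpr (by nlinarith [h.2])
  omega

theorem pvMult_of_dvd {p m : Nat} (hp : 2 ≤ p) (hm : 0 < m) (h : p ∣ m) :
    pvMult p m = pvMult p (m / p) + 1 := by
  rw [pvMult]; simp [hp, hm, h]

theorem pvMult_of_not_dvd {p m : Nat} (h : ¬ p ∣ m) : pvMult p m = 0 := by
  rw [pvMult]; simp [h]


theorem pvMult_dvd (p : Nat) : ∀ m, p ^ pvMult p m ∣ m := by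
  intro m
  induction m using Nat.strong_induction_on with
  | _ m ih =>
    by_cases h : 2 ≤ p ∧ 0 < m ∧ p ∣ m
    · rw [pvMult_of_dvd h.1 h.2.1 h.2.2, pow_succ, mul_comm]
      obtain ⟨c, hc⟩ := h.2.2
      have hdiv : m / p = c := by rw [hc]; exact Nat.mul_div_cancel_left c (by omega)
      have hlt : m / p < m := Nat.div_lt_self h.2.1 h.1
      have := ih (m / p) hlt
      calc p * p ^ pvMult p (m / p) ∣ p * (m / p) := mul_dvd_mul_left p this
        _ = m := by rw [hdiv, hc]
    · have : pvMult p m = 0 := by rw [pvMult]; simp_all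
      simp [this]

theorem pvMult_res_pos {p m : Nat} (hm : 0 < m) : 0 < m / p ^ pvMult p m :=
  Nat.div_pos (Nat.le_of_dvd hm (pvMult_dvd p m)) (Nat.pos_of_dvd_of_pos (pvMult_dvd p m) hm)

theorem pvMult_not_dvd {p m : Nat} (hp : 2 ≤ p) (hm : 0 < m) :
    ¬ p ∣ m / p ^ pvMult p m := by
  induction m using Nat.strong_induction_on with
  | _ m ih =>
    by_cases h : p ∣ m
    · rw [pvMult_of_dvd hp hm h, pow_succ, mul_comm (p ^ _) p, ← Nat.div_div_eq_div_mul]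
      exact ih (m / p) (Nat.div_lt_self hm hp) (Nat.div_pos (Nat.le_of_dvd hm h) (by omega))
    · rw [pvMult_of_not_dvd h]; simpa using h

theorem pvMult_eq (p m : Nat) : m = p ^ pvMult p m * (m / p ^ pvMult p m) :=
  (Nat.mul_div_cancel' (pvMult_dvd p m)).symm

theorem pvL_zero (p : Nat) : pvL 0 p = 0 := by rw [pvL]; simp

theorem pvL_eq_sum {q : Nat} (hq : 2 ≤ q) :
    ∀ m b, Nat.log q m < b → pvL m q = ∑ i ∈ Finset.Ico 1 b, m / q ^ i := by
  intro m
  induction m using Nat.strong_induction_on with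
  | _ m ih =>
    intro b hb
    rcases Nat.eq_zero_or_pos m with rfl | hm
    · simp [pvL_zero]
    rw [pvL]; simp only [hm, hq, and_true, if_pos, dif_pos (And.intro hm hq)]
    obtain ⟨c, rfl⟩ : ∃ c, b = c + 1 := ⟨b - 1, by omega⟩
    rw [Finset.sum_Ico_eq_sum_range]
    simp only [Nat.add_sub_cancel]
    have hterm : ∀ i, m / q ^ (1 + i) = m / q / q ^ i := by
      intro i; rw [Nat.pow_add, pow_one, Nat.div_div_eq_div_mul]
    rcases Nat.eq_zero_or_pos c with rfl | hc
    · -- b = 1 : log q m = 0 so m < q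
      have : m < q := by
        by_contra hge
        have := Nat.log_pos (show 1 < q by omega) (show q ≤ m by omega)
        omega
      simp [Nat.div_eq_of_lt this, pvL_zero]
    · have hrec : pvL (m / q) q = ∑ i ∈ Finset.Ico 1 c, (m / q) / q ^ i := by
        apply ih (m / q) (Nat.div_lt_self hm (by omega))
        have := Nat.log_div_base q m
        omega
      rw [hrec]
      have h1 : ∀ i ∈ Finset.range c, m / q ^ (1 + i) = m / q / q ^ i := fun i _ => hterm i
      rw [Finset.sum_congr rfl h1, Finset.range_eq_Ico,
        Finset.sum_eq_sum_Ico_succ_bot hc]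
      simp

theorem pvL_eq_factorization {q : Nat} (hq : q.Prime) (m : Nat) :
    pvL m q = (Nat.factorial m).factorization q := by
  rw [Nat.factorization_factorial hq (Nat.lt_succ_self (Nat.log q m))]
  exact pvL_eq_sum hq.two_le m _ (Nat.lt_succ_self _)

theorem pv_gcd_ne_zero {a n : ℕ} (hn : n ≠ 0) : Nat.gcd a n ≠ 0 :=
  (Nat.gcd_pos_of_pos_right a (Nat.pos_of_ne_zero hn)).ne'

theorem pv_gcd_mul_coprime {a b n : ℕ} (ha : a ≠ 0) (hb : b ≠ 0) (hn : n ≠ 0)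
    (h : Nat.Coprime a b) : Nat.gcd (a * b) n = Nat.gcd a n * Nat.gcd b n := by
  have hmin : ∀ p, min (a.factorization p) (b.factorization p) = 0 := by
    intro p
    have h1 := Nat.factorization_gcd ha hb
    rw [h, Nat.factorization_one] at h1
    have := congrFun (congrArg DFunLike.coe h1.symm) p
    simpa [Finsupp.inf_apply] using this
  apply Nat.eq_of_factorization_eq
  · exact pv_gcd_ne_zero hn
  · exact Nat.mul_ne_zero (pv_gcd_ne_zero hn) (pv_gcd_ne_zero hn)
  intro p
  rw [Nat.factorization_gcd (Nat.mul_ne_zero ha hb) hn,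
    Nat.factorization_mul (pv_gcd_ne_zero hn) (pv_gcd_ne_zero hn),
    Nat.factorization_gcd ha hn, Nat.factorization_gcd hb hn]
  simp only [Finsupp.inf_apply, Finsupp.add_apply, Nat.factorization_mul ha hb,
    Finsupp.coe_add, Pi.add_apply]
  have := hmin p
  simp only [Nat.min_def] at *
  split_ifs at * <;> omega

theorem pv_gcd_pow_prime {p a M : ℕ} (hp : p.Prime) (hM : M ≠ 0) :
    Nat.gcd (p ^ a) M = p ^ min a (M.factorization p) := by
  apply Nat.eq_of_factorization_eq (pv_gcd_ne_zero hM) (pow_ne_zero _ hp.pos.ne')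
  intro q
  rw [Nat.factorization_gcd (pow_ne_zero _ hp.pos.ne') hM,
    Nat.Prime.factorization_pow hp, Nat.Prime.factorization_pow hp]
  simp only [Finsupp.inf_apply, Finsupp.single_apply]
  by_cases hq : p = q <;> simp [hq]

def pvInv (m p : Nat) : Prop :=
  0 < m ∧ ¬ 2 ∣ m ∧ 3 ≤ p ∧ ¬ 2 ∣ p ∧ ∀ d, 2 ≤ d → d < p → ¬ d ∣ m

theorem pvOdd_props : ∀ m p, pvInv m p →
    ((pvOdd m p).1 * ((pvOdd m p).2.map (fun pa => pa.1 ^ pa.2)).prod = m)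
    ∧ (∀ pa ∈ (pvOdd m p).2, pa.1.Prime ∧ 1 ≤ pa.2 ∧ p ≤ pa.1)
    ∧ (((pvOdd m p).2.map Prod.fst).Pairwise (· < ·))
    ∧ ((pvOdd m p).1 = 1 ∨ ((pvOdd m p).1.Prime ∧ p ≤ (pvOdd m p).1 ∧
        ∀ pa ∈ (pvOdd m p).2, pa.1 < (pvOdd m p).1)) := by
  intro m p
  induction m, p using pvOdd.induct with
  | case1 m p h v ih =>
    intro hInv
    have hvdef : v = pvMult p m := rfl
    clear_value v
    obtain ⟨hm, hodd, hp3, hpodd, hdiv⟩ := hInv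
    have hm' : 0 < m / p ^ v := hvdef ▸ pvMult_res_pos hm
    have hmeq : m = p ^ v * (m / p ^ v) := hvdef ▸ pvMult_eq p m
    have hm'dvd : m / p ^ v ∣ m := Dvd.intro_left _ hmeq.symm
    have hInv' : pvInv (m / p ^ v) (p + 2) := by
      refine ⟨hm', fun h2 => hodd (h2.trans hm'dvd), by omega, by omega, ?_⟩
      intro d hd2 hdlt hddvd
      rcases Nat.lt_or_ge d p with hlt | hge
      · exact hdiv d hd2 hlt (hddvd.trans hm'dvd)
      · rcases Nat.eq_or_lt_of_le hge with rfl | hgt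
        · exact pvMult_not_dvd (by omega) hm (hvdef ▸ hddvd)
        · have h2d : 2 ∣ d := by omega
          exact hodd ((h2d.trans hddvd).trans hm'dvd)
    have IH := ih hInv'
    rw [pvOdd, dif_pos h]
    dsimp only
    rw [← hvdef]
    by_cases hv : v = 0
    · rw [if_pos hv, hv, pow_zero, Nat.div_one]
      rw [hv, pow_zero, Nat.div_one] at IH
      refine ⟨IH.1, fun pa hpa => ?_, IH.2.2.1, ?_⟩
      · have := IH.2.1 pa hpa; exact ⟨this.1, this.2.1, by omega⟩
      · rcases IH.2.2.2 with h1 | ⟨hpr, hple, hltr⟩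
        · exact Or.inl h1
        · exact Or.inr ⟨hpr, by omega, hltr⟩
    · have hpdvd : p ∣ m := by
        by_contra hc
        exact hv (hvdef.trans (pvMult_of_not_dvd hc))
      have hp_prime : p.Prime := by
        rw [Nat.prime_def_lt]
        refine ⟨by omega, fun d hdlt hddvd => ?_⟩
        rcases Nat.lt_or_ge d 2 with hd2 | hd2
        · interval_cases d
          · exact absurd (Nat.eq_zero_of_zero_dvd hddvd) (by omega)
          · rfl
        · exact absurd (hddvd.trans hpdvd) (hdiv d hd2 hdlt)
      rw [if_neg hv]
      constructor
      · rw [List.map_cons, List.prod_cons, ← mul_assoc,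
          mul_comm (pvOdd (m / p ^ v) (p + 2)).1 (p ^ v), mul_assoc, IH.1]
        exact hmeq.symm
      refine ⟨fun pa hpa => ?_, ?_, ?_⟩
      · rcases List.mem_cons.mp hpa with rfl | htail
        · exact ⟨hp_prime, by omega, le_refl p⟩
        · have := IH.2.1 pa htail; exact ⟨this.1, this.2.1, by omega⟩
      · rw [List.map_cons, List.pairwise_cons]
        refine ⟨fun q hq => ?_, IH.2.2.1⟩
        obtain ⟨pa, hpa, rfl⟩ := List.mem_map.mp hq
        have := IH.2.1 pa hpa
        omega
      · rcases IH.2.2.2 with h1 | ⟨hpr, hple, hltr⟩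
        · exact Or.inl h1
        · refine Or.inr ⟨hpr, by omega, fun pa hpa => ?_⟩
          rcases List.mem_cons.mp hpa with rfl | htail
          · omega
          · exact hltr pa htail
  | case2 m p h =>
    intro hInv
    obtain ⟨hm, hodd, hp3, hpodd, hdiv⟩ := hInv
    rw [pvOdd, dif_neg h]
    dsimp only
    refine ⟨by simp, by simp, by simp, ?_⟩
    rcases Nat.lt_or_ge m 2 with hm2 | hm2
    · left; omega
    · right
      have hstop : ¬ p * p ≤ m := fun hc => h ⟨by omega, hc⟩
      have hsq : Nat.sqrt m < p := Nat.sqrt_lt'.mpr (by nlinarith)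
      have hpm : p ≤ m := by
        by_contra hc
        exact hdiv m hm2 (by omega) dvd_rfl
      refine ⟨Nat.prime_def_le_sqrt.mpr ⟨hm2, fun d hd2 hdle => hdiv d hd2 (by omega)⟩,
        hpm, by simp⟩

theorem pvFacP_spec : ∀ (fuel : Nat), ∀ (m p : Nat) (d : PySem.Dict Int Int),
    m < fuel → 0 < m → 2 ≤ p →
    pvFacP fuel (↑m) (↑p) d = ((↑(m / p ^ pvMult p m) : Int),
      if pvMult p m = 0 then d else d.insert (↑p) (d.getD (↑p) 0 + (↑(pvMult p m) : Int))) := by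
  intro fuel
  induction fuel with
  | zero => intro m p d hf; omega
  | succ fuel ih =>
    intro m p d hf hm hp
    rw [pvFacP]
    by_cases hdvd : p ∣ m
    · have hmod : PySem.Int.mod (↑m) (↑p) = 0 := by
        rw [PySem.Int.mod_natCast]
        exact_mod_cast Nat.dvd_iff_mod_eq_zero.mp hdvd
      rw [if_pos hmod, PySem.Int.floordiv_natCast]
      have hmp : 0 < m / p := Nat.div_pos (Nat.le_of_dvd hm hdvd) (by omega)
      have hlt : m / p < m := Nat.div_lt_self hm hp
      rw [ih (m / p) p _ (by omega) hmp hp]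
      rw [pvMult_of_dvd hp hm hdvd]
      have hres : m / p / p ^ pvMult p (m / p) = m / p ^ (pvMult p (m / p) + 1) := by
        rw [Nat.div_div_eq_div_mul, pow_succ, mul_comm p _, ← pow_succ]
      rw [hres]
      rcases Nat.eq_zero_or_pos (pvMult p (m / p)) with hz | hpos
      · rw [hz]; simp
      · rw [if_neg (by omega), if_neg (by omega)]
        rw [PySem.Dict.getD_insert_self, PySem.Dict.insert_insert_self]
        congr 1
        push_cast
        ring
    · have hmod : ¬ PySem.Int.mod (↑m) (↑p) = 0 := by
        rw [PySem.Int.mod_natCast]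
        intro hc
        exact hdvd (Nat.dvd_iff_mod_eq_zero.mpr (by exact_mod_cast hc))
      rw [if_neg hmod, pvMult_of_not_dvd hdvd]
      simp

theorem pvFac2_eq_facP : ∀ (fuel : Nat) (k : Int) (d : PySem.Dict Int Int),
    pvFac2 fuel k d = pvFacP fuel k 2 d := by
  intro fuel
  induction fuel with
  | zero => intro k d; rfl
  | succ fuel ih =>
    intro k d
    rw [pvFac2, pvFacP]
    split
    · exact ih _ _
    · rfl

theorem pvFacOdd_spec : ∀ (fuel : Nat) (m p : Nat) (d : PySem.Dict Int Int),
    0 < m → 2 ≤ p → Nat.sqrt m < fuel + p → (∀ q ∈ d.keys, q < (↑p : Int)) →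
    (pvFacOdd fuel (↑m) (↑p) d).1 = ↑(pvOdd m p).1 ∧
    (pvFacOdd fuel (↑m) (↑p) d).2.items = d.items ++ pvCast (pvOdd m p).2 := by
  intro fuel
  induction fuel with
  | zero =>
    intro m p d hm hp hsq hkeys
    have hstop : ¬ p * p ≤ m := by
      intro hc
      have : p ≤ Nat.sqrt m := Nat.le_sqrt'.mpr (by nlinarith)
      omega
    rw [pvOdd, dif_neg (by tauto)]
    simp [pvFacOdd, pvCast]
  | succ fuel ih =>
    intro m p d hm hp hsq hkeys
    rw [pvFacOdd]
    by_cases hle : p * p ≤ m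
    · have hleI : (↑p : Int) * ↑p ≤ ↑m := by exact_mod_cast hle
      rw [if_pos hleI]
      have hnat : (↑m : Int).natAbs = m := Int.natAbs_natCast m
      rw [hnat, pvFacP_spec (m + 1) m p d (by omega) hm hp]
      set v := pvMult p m with hv
      set m' := m / p ^ v with hm'def
      have hm' : 0 < m' := pvMult_res_pos hm
      set d' := if v = 0 then d else d.insert (↑p) (d.getD (↑p) 0 + (↑v : Int)) with hd'
      have hcontains : d.contains (↑p : Int) = false := by
        by_contra hc
        have : d.contains (↑p : Int) = true := by simpa using hc
        have hmem := (PySem.Dict.contains_iff_mem_keys d (↑p : Int)).mp this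
        exact absurd (hkeys _ hmem) (lt_irrefl _)
      have hd'items : d'.items = if v = 0 then d.items else d.items ++ [((↑p : Int), (↑v : Int))] := by
        rw [hd']
        split
        · rfl
        · rw [PySem.Dict.items_insert_of_not_contains d _ hcontains,
            PySem.Dict.getD_of_not_contains d 0 hcontains]
          simp
      have hd'keys : ∀ q ∈ d'.keys, q < ((↑(p + 2) : Int)) := by
        intro q hq
        rw [hd'] at hq
        split at hq
        · have := hkeys q hq; push_cast; omega
        · rcases (PySem.Dict.mem_keys_insert d _ q _).mp hq with rfl | hmem
          · push_cast; omega
          · have := hkeys q hmem; push_cast; omega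
      have hrec := ih m' (p + 2) d' hm' (by omega)
        (by
          have h1 : Nat.sqrt m' ≤ Nat.sqrt m := Nat.sqrt_le_sqrt (Nat.div_le_self _ _)
          omega)
        hd'keys
      rw [show ((↑p : Int) + 2) = (↑(p + 2) : Int) by push_cast; ring] at *
      have hunf : pvOdd m p = ((pvOdd m' (p + 2)).1,
          if v = 0 then (pvOdd m' (p + 2)).2 else (p, v) :: (pvOdd m' (p + 2)).2) := by
        rw [pvOdd, dif_pos ⟨(show 2 ≤ p by omega), hle⟩]
      refine ⟨?_, ?_⟩
      · rw [hrec.1, hunf]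
      · rw [hrec.2, hd'items, hunf]
        dsimp only
        split
        · simp
        · simp [pvCast]
    · have hleI : ¬ ((↑p : Int) * ↑p ≤ ↑m) := by exact_mod_cast hle
      rw [if_neg hleI, pvOdd, dif_neg (by tauto)]
      simp [pvCast]

theorem pvExp_spec : ∀ (fuel : Nat) (N q : Nat) (cnt : Int), N < fuel → 2 ≤ q →
    pvExpInFact fuel (↑N) (↑q) cnt = cnt + ↑(pvL N q) := by
  intro fuel
  induction fuel with
  | zero => intro N q cnt h; omega
  | succ fuel ih =>
    intro N q cnt hf hq
    rw [pvExpInFact]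
    rcases Nat.eq_zero_or_pos N with rfl | hN
    · simp [pvL_zero]
    · rw [if_pos (by exact_mod_cast hN.ne')]
      rw [PySem.Int.floordiv_natCast]
      have hlt : N / q < N := Nat.div_lt_self hN hq
      rw [ih (N / q) q _ (by omega) hq]
      have hNL : pvL N q = N / q + pvL (N / q) q := by rw [pvL, dif_pos ⟨hN, hq⟩]
      rw [hNL]
      push_cast
      ring

theorem pv_prod_pos (L : List (Nat × Nat)) (h : ∀ pa ∈ L, pa.1.Prime) :
    0 < (L.map fun pa => pa.1 ^ pa.2).prod := by
  apply List.prod_pos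
  intro x hx
  obtain ⟨pa, hpa, rfl⟩ := List.mem_map.mp hx
  exact pow_pos (h pa hpa).pos _

theorem pv_prod_gcd : ∀ (L : List (Nat × Nat)) (M : Nat), M ≠ 0 →
    (∀ pa ∈ L, pa.1.Prime) → ((L.map Prod.fst).Pairwise (· ≠ ·)) →
    Nat.gcd ((L.map fun pa => pa.1 ^ pa.2).prod) M
      = (L.map (fun pa => Nat.gcd (pa.1 ^ pa.2) M)).prod := by
  intro L
  induction L with
  | nil => intro M hM _ _; simp
  | cons pa t ih =>
    intro M hM hprime hpw
    obtain ⟨q, a⟩ := pa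
    rw [List.map_cons, List.map_cons, List.prod_cons, List.prod_cons]
    have hq : q.Prime := hprime _ (List.mem_cons_self)
    have hcop : Nat.Coprime (q ^ a) ((t.map fun pa => pa.1 ^ pa.2).prod) := by
      apply Nat.Coprime.pow_left
      rw [Nat.coprime_list_prod_right_iff]
      intro x hx
      obtain ⟨pb, hpb, rfl⟩ := List.mem_map.mp hx
      apply Nat.Coprime.pow_right
      refine (Nat.coprime_primes hq (hprime pb (List.mem_cons_of_mem _ hpb))).mpr ?_
      have := (List.pairwise_cons.mp hpw).1 pb.1 (List.mem_map.mpr ⟨pb, hpb, rfl⟩)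
      exact this
    rw [pv_gcd_mul_coprime (pow_ne_zero _ hq.pos.ne')
      (pv_prod_pos t (fun pb hpb => hprime pb (List.mem_cons_of_mem _ hpb))).ne' hM hcop]
    rw [ih M hM (fun pb hpb => hprime pb (List.mem_cons_of_mem _ hpb))
      (List.pairwise_cons.mp hpw).2]

theorem pv_fold_A : ∀ (L : List (Nat × Nat)) (N : Nat) (g0 : Int),
    (∀ pa ∈ L, pa.1.Prime ∧ 1 ≤ pa.2) →
    (pvCast L).foldl (fun g pa =>
        if pvExpInFact (N + 1) (↑N) pa.1 0 > 0
        then g * pa.1 ^ (min pa.2 (pvExpInFact (N + 1) (↑N) pa.1 0)).toNat else g) g0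
      = g0 * ↑((L.map (fun pa => Nat.gcd (pa.1 ^ pa.2) (Nat.factorial N))).prod) := by
  intro L
  induction L with
  | nil => intro N g0 _; simp [pvCast]
  | cons pa t ih =>
    intro N g0 hL
    obtain ⟨q, a⟩ := pa
    have hq : q.Prime := (hL _ List.mem_cons_self).1
    have ha : 1 ≤ a := (hL _ List.mem_cons_self).2
    rw [pvCast, List.map_cons, List.foldl_cons]
    dsimp only
    rw [pvExp_spec (N + 1) N q 0 (by omega) hq.two_le, zero_add]
    rw [pvL_eq_factorization hq]
    set v := (Nat.factorial N).factorization q with hv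
    have hgcd : Nat.gcd (q ^ a) (Nat.factorial N) = q ^ min a v :=
      pv_gcd_pow_prime hq (Nat.factorial_ne_zero N)
    have htail := ih N
    rcases Nat.eq_zero_or_pos v with hz | hpos
    · rw [if_neg (by rw [hz]; simp)]
      rw [show List.map (fun pa => ((↑pa.1 : Int), (↑pa.2 : Int))) t = pvCast t from rfl]
      rw [htail _ (fun pb hpb => hL pb (List.mem_cons_of_mem _ hpb))]
      rw [List.map_cons, List.prod_cons, hgcd, hz]
      simp
    · rw [if_pos (by positivity)]
      rw [show List.map (fun pa => ((↑pa.1 : Int), (↑pa.2 : Int))) t = pvCast t from rfl]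
      rw [htail _ (fun pb hpb => hL pb (List.mem_cons_of_mem _ hpb))]
      rw [List.map_cons, List.prod_cons, hgcd]
      have hmin : (min (↑a : Int) (↑v)).toNat = min a v := by omega
      rw [hmin]
      push_cast
      ring

theorem pv_A_eq (N K : Nat) (hK : 0 < K) :
    gcd_factorial (↑N) (↑K) = ↑(Nat.gcd K (Nat.factorial N)) := by
  set v2 := pvMult 2 K with hv2
  set m1 := K / 2 ^ v2 with hm1
  have hm1pos : 0 < m1 := pvMult_res_pos hK
  have hm1odd : ¬ 2 ∣ m1 := pvMult_not_dvd (le_refl 2) hK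
  have hKeq : K = 2 ^ v2 * m1 := pvMult_eq 2 K
  -- step 1: the 2-loop
  have h2 : pvFac2 ((↑K : Int).natAbs + 1) (↑K) PySem.Dict.empty
      = ((↑m1 : Int), if v2 = 0 then PySem.Dict.empty
          else PySem.Dict.empty.insert ((2:ℕ) : Int) (PySem.Dict.empty.getD ((2:ℕ) : Int) 0 + (↑v2 : Int))) := by
    rw [Int.natAbs_natCast, pvFac2_eq_facP]
    rw [show ((2:Int)) = ((2:ℕ) : Int) by norm_num]
    exact pvFacP_spec (K + 1) K 2 _ (by omega) hK (le_refl 2)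
  set D1 : PySem.Dict Int Int := if v2 = 0 then PySem.Dict.empty
      else PySem.Dict.empty.insert ((2:ℕ) : Int) (PySem.Dict.empty.getD ((2:ℕ) : Int) 0 + (↑v2 : Int)) with hD1
  have hD1items : D1.items = pvCast (if v2 = 0 then [] else [(2, v2)]) := by
    by_cases hz : v2 = 0
    · rw [hD1, if_pos hz, if_pos hz]; rfl
    · rw [hD1, if_neg hz, if_neg hz,
        PySem.Dict.items_insert_of_not_contains _ _ (PySem.Dict.contains_empty _),
        PySem.Dict.getD_empty]
      show ([] : List (Int × Int)) ++ _ = _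
      simp [pvCast]
  have hD1keys : ∀ q ∈ D1.keys, q < (((3:ℕ)) : Int) := by
    intro q hq
    rw [hD1] at hq
    split at hq
    · simp [PySem.Dict.keys_empty] at hq
    · rcases (PySem.Dict.mem_keys_insert _ _ _ _).mp hq with rfl | hmem
      · exact_mod_cast (by omega : (2:ℕ) < 3)
      · simp [PySem.Dict.keys_empty] at hmem
  -- step 2: the odd loop
  have hInv : pvInv m1 3 := by
    refine ⟨hm1pos, hm1odd, le_refl 3, by omega, ?_⟩
    intro d hd2 hd3
    have : d = 2 := by omega
    subst this
    exact hm1odd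
  have hsqb : Nat.sqrt m1 < ((↑m1 : Int).natAbs + 1) + 3 := by
    rw [Int.natAbs_natCast]
    have := Nat.sqrt_le_self m1
    omega
  have hodd := pvFacOdd_spec ((↑m1 : Int).natAbs + 1) m1 3 D1 hm1pos (by omega) hsqb hD1keys
  have hprops := pvOdd_props m1 3 hInv
  set r := (pvOdd m1 3).1 with hr
  set Lodd := (pvOdd m1 3).2 with hL
  have hrpos : 0 < r := by
    rcases Nat.eq_zero_or_pos r with hz | h
    · exfalso
      have h1 := hprops.1
      rw [hz, zero_mul] at h1
      omega
    · exact h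
  -- the assembled factor list
  set full : List (Nat × Nat) :=
    (if v2 = 0 then [] else [(2, v2)]) ++ Lodd ++ (if r = 1 then [] else [(r, 1)]) with hfull
  have hrfacts := hprops.2.2.2
  have hitems : (pvFactorize (↑K)).items = pvCast full := by
    rw [pvFactorize]
    rw [h2]
    rw [show ((3:Int)) = ((3:ℕ) : Int) by norm_num]
    have h1 := hodd.1
    have h2i := hodd.2
    rcases Nat.lt_or_ge 1 r with hr1 | hr1
    · -- leftover r > 1 is inserted
      rw [if_pos (by rw [h1]; exact_mod_cast hr1)]
      have hkeys2 : ((↑r : Int)) ∉ (pvFacOdd ((↑m1:Int).natAbs + 1) (↑m1) (↑(3:ℕ)) D1).2.keys := by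
        intro hmem
        rw [show (pvFacOdd ((↑m1:Int).natAbs + 1) (↑m1) (↑(3:ℕ)) D1).2.keys
            = (pvFacOdd ((↑m1:Int).natAbs + 1) (↑m1) (↑(3:ℕ)) D1).2.items.map Prod.fst from rfl,
          h2i, hD1items] at hmem
        rcases List.mem_map.mp hmem with ⟨pb, hpb, hfst⟩
        rcases List.mem_append.mp hpb with hin1 | hin2
        · -- pb from the 2-entry
          rcases hrfacts with hre | ⟨hrp, hr3, _⟩; · omega
          have hpb2 : pb = ((2:Int), (↑v2 : Int)) := by
            revert hin1; split
            · intro h; simp [pvCast] at h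
            · intro h; simp [pvCast] at h; exact h
          rw [hpb2] at hfst
          have h2r : (2:ℕ) = r := by
            have h' : ((2:ℕ) : Int) = ↑r := by simpa using hfst
            exact_mod_cast h'
          omega
        · rcases hrfacts with hre | ⟨hrp, hr3, hlt⟩; · omega
          rcases List.mem_map.mp hin2 with ⟨pc, hpc, rfl⟩
          have hlt' := hlt pc hpc
          have hcr : pc.1 = r := by
            have : ((pc.1 : Nat) : Int) = ↑r := by simpa using hfst
            exact_mod_cast this
          omega
      have hcont : (pvFacOdd ((↑m1:Int).natAbs + 1) (↑m1) (↑(3:ℕ)) D1).2.contains ((↑r : Int)) = false := by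
        rcases hb : (pvFacOdd ((↑m1:Int).natAbs + 1) (↑m1) (↑(3:ℕ)) D1).2.contains ((↑r : Int)) with _ | _
        · rfl
        · exact absurd ((PySem.Dict.contains_iff_mem_keys _ _).mp hb) hkeys2
      rw [h1]
      rw [PySem.Dict.items_insert_of_not_contains _ _ hcont,
        PySem.Dict.getD_of_not_contains _ 0 hcont, h2i, hD1items]
      rw [hfull]
      have hrne : ¬ r = 1 := by omega
      simp [pvCast, hrne]
    · -- r = 1 : no leftover
      have : r = 1 := by omega
      rw [if_neg (by rw [h1]; exact_mod_cast (by omega : ¬ (1:ℕ) < r))]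
      rw [h2i, hD1items, hfull, if_pos this]
      simp [pvCast]
  -- facts about full
  have hfull_prime : ∀ pa ∈ full, pa.1.Prime ∧ 1 ≤ pa.2 := by
    intro pa hpa
    rw [hfull] at hpa
    rcases List.mem_append.mp hpa with h12 | hin3
    · rcases List.mem_append.mp h12 with hin1 | hin2
      · revert hin1; split
        · intro h; simp at h
        · intro h; simp at h; rw [h]
          refine ⟨Nat.prime_two, by omega⟩
      · have := hprops.2.1 pa hin2
        exact ⟨this.1, this.2.1⟩
    · revert hin3; split
      · intro h; simp at h
      · intro h; simp at h; rw [h]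
        rcases hrfacts with hre | ⟨hrp, _, _⟩; · omega
        exact ⟨hrp, le_refl 1⟩
  have hfull_pw : (full.map Prod.fst).Pairwise (· ≠ ·) := by
    have hlt : (full.map Prod.fst).Pairwise (· < ·) := by
      rw [hfull]
      rw [List.map_append, List.map_append]
      rw [List.pairwise_append]
      refine ⟨?_, ?_, ?_⟩
      · rw [List.pairwise_append]
        refine ⟨?_, hprops.2.2.1, ?_⟩
        · split <;> simp
        · intro a ha b hb
          have hb3 := hprops.2.1
          rcases List.mem_map.mp hb with ⟨pb, hpb, rfl⟩
          have := (hb3 pb hpb).2.2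
          revert ha; split
          · intro h; simp at h
          · intro h; simp at h; omega
      · split <;> simp
      · intro a ha b hb
        rcases hrfacts with hre | ⟨hrp, hr3, hltr⟩
        · revert hb; split
          · intro h; simp at h
          · intro h; omega
        · have hbr : b = r := by
            revert hb; split
            · intro h; simp at h
            · intro h; simp at h; omega
          subst hbr
          rcases List.mem_append.mp ha with hin1 | hin2
          · revert hin1; split
            · intro h; simp at h
            · intro h; simp at h; omega
          · rcases List.mem_map.mp hin2 with ⟨pc, hpc, rfl⟩
            exact hltr pc hpc
    exact hlt.imp (fun h => Nat.ne_of_lt h)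
  have hfull_prod : (full.map fun pa => pa.1 ^ pa.2).prod = K := by
    rw [hfull]
    rw [List.map_append, List.map_append, List.prod_append, List.prod_append]
    have h1 : ((if v2 = 0 then ([] : List (ℕ × ℕ)) else [(2, v2)]).map fun pa => pa.1 ^ pa.2).prod
        = 2 ^ v2 := by
      by_cases hz : v2 = 0
      · rw [if_pos hz, hz]; simp
      · rw [if_neg hz]; simp
    have h3 : ((if r = 1 then ([] : List (ℕ × ℕ)) else [(r, 1)]).map fun pa => pa.1 ^ pa.2).prod
        = r := by
      by_cases hz : r = 1
      · rw [if_pos hz]; simp [hz]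
      · rw [if_neg hz]; simp
    rw [h1, h3]
    have hP1 := hprops.1
    rw [mul_assoc, mul_comm (Lodd.map fun pa => pa.1 ^ pa.2).prod r, hP1]
    exact hKeq.symm
  -- final computation
  rw [gcd_factorial]
  dsimp only
  rw [hitems, Int.natAbs_natCast]
  rw [pv_fold_A full N 1 hfull_prime]
  rw [← pv_prod_gcd full (Nat.factorial N) (Nat.factorial_ne_zero N)
    (fun pa hpa => (hfull_prime pa hpa).1) hfull_pw]
  rw [hfull_prod, one_mul]

-- ===== B-side lemmas =====

-- Euclid's loop computes the gcd (argument order: pvGcdLoop _ a b = gcd of b and a)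
theorem pvGcd_spec : ∀ (fuel a b : Nat), b < fuel →
    pvGcdLoop fuel (↑a) (↑b) = ↑(Nat.gcd b a) := by
  intro fuel
  induction fuel with
  | zero => intro a b h; omega
  | succ fuel ih =>
    intro a b hf
    rw [pvGcdLoop]
    rcases Nat.eq_zero_or_pos b with rfl | hb
    · simp
    · rw [if_pos (by exact_mod_cast hb.ne'), PySem.Int.mod_natCast]
      have hlt : a % b < b := Nat.mod_lt a hb
      rw [ih b (a % b) (by omega)]
      rw [Nat.gcd_rec b a]

-- the per-prime balance behind the gcd-extraction loop:
-- gcd(r, a·b) = gcd(a, r) · gcd(r / gcd(a, r), b)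
theorem pv_gcd_split (a r b : ℕ) (ha : a ≠ 0) (hr : r ≠ 0) (hb : b ≠ 0) :
    Nat.gcd r (a * b) = Nat.gcd a r * Nat.gcd (r / Nat.gcd a r) b := by
  have hg : Nat.gcd a r ≠ 0 := pv_gcd_ne_zero hr
  have hgd : Nat.gcd a r ∣ r := Nat.gcd_dvd_right a r
  have hq : r / Nat.gcd a r ≠ 0 :=
    (Nat.div_pos (Nat.le_of_dvd (Nat.pos_of_ne_zero hr) hgd) (Nat.pos_of_ne_zero hg)).ne'
  apply Nat.eq_of_factorization_eq
  · exact pv_gcd_ne_zero (Nat.mul_ne_zero ha hb)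
  · exact Nat.mul_ne_zero (pv_gcd_ne_zero hr) (pv_gcd_ne_zero hb)
  intro p
  rw [Nat.factorization_gcd hr (Nat.mul_ne_zero ha hb),
    Nat.factorization_mul ha hb,
    Nat.factorization_mul (pv_gcd_ne_zero hr) (pv_gcd_ne_zero hb),
    Nat.factorization_gcd ha hr, Nat.factorization_gcd hq hb,
    Nat.factorization_div hgd, Nat.factorization_gcd ha hr]
  simp only [Finsupp.inf_apply, Finsupp.add_apply, Finsupp.coe_add, Pi.add_apply,
    Finsupp.coe_tsub, Pi.sub_apply, Finsupp.coe_add]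
  simp only [Nat.min_def]
  split_ifs <;> omega

-- the loop invariant: starting at counter i with residual r and accumulator R,
-- fuel more iterations return R · gcd(r, i·(i+1)···(i+fuel−1))
theorem pvAltLoop_spec : ∀ (fuel : Nat) (i R r : Nat), 1 ≤ r → 1 ≤ i →
    (pvAltLoop fuel (↑i) (↑R) (↑r)).1
      = ↑(R * Nat.gcd r (∏ j ∈ Finset.Ico i (i + fuel), j)) := by
  intro fuel
  induction fuel with
  | zero =>
    intro i R r hr hi
    simp [pvAltLoop]
  | succ fuel ih =>
    intro i R r hr hi
    rw [pvAltLoop]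
    rcases Nat.eq_or_lt_of_le hr with h1 | hr2
    · rw [if_pos (by exact_mod_cast h1.symm)]
      rw [← h1, Nat.gcd_one_left, Nat.mul_one]
    · rw [if_neg (by exact_mod_cast (by omega : ¬ r = 1))]
      have hge := pvGcd_spec (r + 1) i r (Nat.lt_succ_self r)
      have hGpos : 0 < Nat.gcd r i := Nat.gcd_pos_of_pos_left i (by omega)
      have hGdvd : Nat.gcd r i ∣ r := Nat.gcd_dvd_left r i
      have hr' : 1 ≤ r / Nat.gcd r i := Nat.div_pos (Nat.le_of_dvd (by omega) hGdvd) hGpos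
      simp only [Int.natAbs_natCast, hge, PySem.Int.floordiv_natCast]
      rw [show ((↑i : Int) + 1) = (↑(i + 1) : Int) by push_cast; ring,
        show ((↑R : Int) * (↑(Nat.gcd r i) : Int)) = (↑(R * Nat.gcd r i) : Int) by push_cast; ring]
      rw [ih (i + 1) (R * Nat.gcd r i) (r / Nat.gcd r i) hr' (by omega)]
      have hsplit : ∏ j ∈ Finset.Ico i (i + (fuel + 1)), j
          = i * ∏ j ∈ Finset.Ico (i + 1) (i + 1 + fuel), j := by
        rw [show i + (fuel + 1) = i + 1 + fuel by omega]
        exact Finset.prod_eq_prod_Ico_succ_bot (by omega) _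
      have hMpos : (∏ j ∈ Finset.Ico (i + 1) (i + 1 + fuel), j) ≠ 0 := by
        refine (Finset.prod_pos ?_).ne'
        intro j hj
        have := (Finset.mem_Ico.mp hj).1
        omega
      rw [hsplit, pv_gcd_split i r _ (by omega) (by omega) hMpos, Nat.gcd_comm i r]
      congr 1
      ring

theorem pv_prod_Ico_factorial : ∀ N : ℕ, (∏ j ∈ Finset.Ico 2 (N + 2), j) = (N + 1).factorial := by
  intro N
  induction N with
  | zero => decide
  | succ M ih =>
    rw [show M + 1 + 2 = (M + 2) + 1 by omega,
      Finset.prod_Ico_succ_top (by omega), ih, Nat.factorial_succ (M + 1)]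
    ring

theorem pv_B_eq (N K : Nat) (hK : 0 < K) :
    gcd_factorial_alt (↑N) (↑K) = ↑(Nat.gcd K (Nat.factorial N)) := by
  rw [gcd_factorial_alt]
  cases N with
  | zero =>
    have : ((↑(0:ℕ) : Int) - 1).toNat = 0 := by decide
    rw [this]
    simp [pvAltLoop, Nat.factorial]
  | succ M =>
    have hfuel : ((↑(M + 1 : ℕ) : Int) - 1).toNat = M := by omega
    rw [hfuel,
      show ((2 : Int)) = (↑(2:ℕ) : Int) by norm_num,
      show ((1 : Int)) = (↑(1:ℕ) : Int) by norm_num]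
    rw [pvAltLoop_spec M 2 1 K hK (by omega)]
    rw [show 2 + M = M + 2 by omega, pv_prod_Ico_factorial M, Nat.one_mul]

theorem pv_main : ∀ (n : Int) (k : Int), 0 ≤ n → 1 ≤ k →
    gcd_factorial n k = gcd_factorial_alt n k := by
  intro n k hn hk
  obtain ⟨N, rfl⟩ : ∃ N : ℕ, n = (↑N : Int) := ⟨n.toNat, (Int.toNat_of_nonneg hn).symm⟩
  obtain ⟨K, rfl⟩ : ∃ K : ℕ, k = (↑K : Int) := ⟨k.toNat, (Int.toNat_of_nonneg (by omega)).symm⟩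
  have hKpos : 0 < K := by exact_mod_cast hk
  rw [pv_A_eq N K hKpos, pv_B_eq N K hKpos]

-- ===== VERDICT (by name: the statement is the Claim_ definition above) =====
theorem gcd_factorial_spec : Claim_equal_gcd_factorial := by
  intro n k _ hpre
  unfold Spec_gcd_factorial
  exact pv_main n k hpre.1 hpre.2
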